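-- pv_equiv track=rewrite | github.com/dataraum/dataraum-context | src/dataraum/analysis/relationships/joins.py | _get_type_group
-- ===== SOURCE A (Python) =====
-- TYPE_GROUPS: dict[str, set[str]] = {
--     # Numeric: DuckDB handles implicit casting between all numeric types
--     "numeric": {
--         "TINYINT",
--         "INT1",
--         "SMALLINT",
--         "INT2",
--         "SHORT",
--         "INTEGER",
--         "INT4",
--         "INT",
--         "SIGNED",
--         "BIGINT",
--         "INT8",
--         "LONG",
--         "HUGEINT",
--         "UTINYINT",
--         "USMALLINT",
--         "UINTEGER",
--         "UBIGINT",
--         "UHUGEINT",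
--         "FLOAT",
--         "FLOAT4",
--         "REAL",
--         "DOUBLE",
--         "FLOAT8",
--         "DECIMAL",
--         "NUMERIC",
--     },
--     # String types
--     "string": {"VARCHAR", "CHAR", "TEXT", "STRING", "BPCHAR"},
--     # Temporal: cast all to TIMESTAMP for comparison
--     "temporal": {
--         "DATE",
--         "TIME",
--         "TIMESTAMP",
--         "DATETIME",
--         "TIMESTAMP WITH TIME ZONE",
--         "TIMESTAMPTZ",
--         "TIMESTAMP_S",
--         "TIMESTAMP_MS",
--         "TIMESTAMP_NS",
--     },
--     # Boolean
--     "boolean": {"BOOLEAN", "BOOL", "LOGICAL"},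
--     # UUID
--     "uuid": {"UUID"},
-- }
--
-- def _get_type_group(resolved_type: str | None) -> str | None:
--     """Get the compatibility group for a resolved type.
--
--     Args:
--         resolved_type: The column's resolved type (e.g., "VARCHAR", "BIGINT", "DECIMAL(18,2)")
--
--     Returns:
--         Group name ("numeric", "string", "temporal", "boolean", "uuid") or None if unknown
--     """
--     if not resolved_type:
--         return None
--
--     # Normalize: uppercase, strip precision like DECIMAL(18,2) -> DECIMAL
--     normalized = resolved_type.upper().split("(")[0].strip()
--
--     for group, types in TYPE_GROUPS.items():
--         if normalized in types:
--             return group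
--     return None
-- ===== SOURCE B (Python) =====
-- TYPE_GROUPS: dict[str, set[str]] = {
--     "numeric": {
--         "TINYINT", "INT1", "SMALLINT", "INT2", "SHORT", "INTEGER", "INT4",
--         "INT", "SIGNED", "BIGINT", "INT8", "LONG", "HUGEINT", "UTINYINT",
--         "USMALLINT", "UINTEGER", "UBIGINT", "UHUGEINT", "FLOAT", "FLOAT4",
--         "REAL", "DOUBLE", "FLOAT8", "DECIMAL", "NUMERIC",
--     },
--     "string": {"VARCHAR", "CHAR", "TEXT", "STRING", "BPCHAR"},
--     "temporal": {
--         "DATE", "TIME", "TIMESTAMP", "DATETIME", "TIMESTAMP WITH TIME ZONE",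
--         "TIMESTAMPTZ", "TIMESTAMP_S", "TIMESTAMP_MS", "TIMESTAMP_NS",
--     },
--     "boolean": {"BOOLEAN", "BOOL", "LOGICAL"},
--     "uuid": {"UUID"},
-- }
--
-- # Flat index built once at import time: each type name maps straight to its
-- # group (the groups are disjoint, so the flattening is unambiguous).
-- TYPE_TO_GROUP: dict[str, str] = {}
-- for _group, _types in TYPE_GROUPS.items():
--     for _t in _types:
--         TYPE_TO_GROUP[_t] = _group
--
--
-- def _get_type_group(resolved_type: str | None) -> str | None:
--     if not resolved_type:
--         return None
--     # take the prefix before any precision suffix, e.g. "decimal(18,2)" -> "DECIMAL"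
--     head = resolved_type.upper().partition("(")[0]
--     return TYPE_TO_GROUP.get(head.strip())
-- ===== Notes on version B (the rewrite author's own statement) =====
-- stated objective: idiomatic
-- what changed: A's per-call loop over the five (group, set) pairs is replaced by a flat type->group dict precomputed once at module scope (the loop disappears entirely; lookup is one dict .get), and the precision suffix is cut with str.partition instead of split-and-index; correct because the groups are disjoint and upper/partition/strip commute the same way.
import Mathlib
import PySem

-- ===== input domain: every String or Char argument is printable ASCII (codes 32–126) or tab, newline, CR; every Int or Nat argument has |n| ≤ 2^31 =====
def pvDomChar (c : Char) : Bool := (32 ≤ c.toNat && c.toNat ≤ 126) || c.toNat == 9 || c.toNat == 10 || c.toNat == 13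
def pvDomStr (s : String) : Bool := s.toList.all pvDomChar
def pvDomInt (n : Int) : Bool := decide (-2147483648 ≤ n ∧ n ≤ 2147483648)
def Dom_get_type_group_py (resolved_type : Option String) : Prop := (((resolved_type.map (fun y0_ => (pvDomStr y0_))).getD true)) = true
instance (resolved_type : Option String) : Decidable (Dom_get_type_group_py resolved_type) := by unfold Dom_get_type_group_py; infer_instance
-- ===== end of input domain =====

-- B replaces A's per-call loop over five (group, set) pairs by one flat type->group
-- dictionary built once, and cuts the precision suffix with partition("(") instead of
-- split("(")[0]: the per-call group loop disappears entirely (idiomatic).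


-- ===== PORT A =====
def pvNumericTypes : PySem.Set String := PySem.Set.ofList
  ["TINYINT", "INT1", "SMALLINT", "INT2", "SHORT", "INTEGER", "INT4",
   "INT", "SIGNED", "BIGINT", "INT8", "LONG", "HUGEINT", "UTINYINT",
   "USMALLINT", "UINTEGER", "UBIGINT", "UHUGEINT", "FLOAT", "FLOAT4",
   "REAL", "DOUBLE", "FLOAT8", "DECIMAL", "NUMERIC"]
def pvStringTypes : PySem.Set String := PySem.Set.ofList
  ["VARCHAR", "CHAR", "TEXT", "STRING", "BPCHAR"]
def pvTemporalTypes : PySem.Set String := PySem.Set.ofList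
  ["DATE", "TIME", "TIMESTAMP", "DATETIME", "TIMESTAMP WITH TIME ZONE",
   "TIMESTAMPTZ", "TIMESTAMP_S", "TIMESTAMP_MS", "TIMESTAMP_NS"]
def pvBooleanTypes : PySem.Set String := PySem.Set.ofList ["BOOLEAN", "BOOL", "LOGICAL"]
def pvUuidTypes : PySem.Set String := PySem.Set.ofList ["UUID"]

def pvTypeGroups : List (String × PySem.Set String) :=
  [("numeric", pvNumericTypes), ("string", pvStringTypes),
   ("temporal", pvTemporalTypes), ("boolean", pvBooleanTypes),
   ("uuid", pvUuidTypes)]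

-- A's "for group, types in TYPE_GROUPS.items(): if normalized in types: return group"
def pvGroupLoop (normalized : String) : List (String × PySem.Set String) → Option String
  | [] => none
  | (group, types) :: rest =>
      if PySem.Set.contains types normalized then some group
      else pvGroupLoop normalized rest

def get_type_group_py (resolved_type : Option String) : Option String :=
  match resolved_type with
  | none => none
  | some s =>
    if s = "" then none
    else
      -- s.upper().split("(")[0].strip(); the separator "(" is nonempty so split? is some,
      -- and the split result is nonempty so index [0] is its head
      let normalized :=
        PySem.Str.strip (((PySem.Str.split? (PySem.Str.upper s) "(").getD []).headD "")
      pvGroupLoop normalized pvTypeGroups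

-- ===== PORT B =====
-- module-level "for _group, _types in TYPE_GROUPS.items(): for _t in _types: TYPE_TO_GROUP[_t] = _group"
def pvTypeToGroup : PySem.Dict String String :=
  pvTypeGroups.foldl
    (fun d p => p.2.foldl (fun d t => PySem.Dict.insert d t p.1) d)
    (PySem.Dict.mk [])

-- resolved_type.upper().partition("(")[0] is the prefix of the uppercased string
-- before the first '(' (the whole string if none): exactly takeWhile (· ≠ '(')
-- on its characters — exact, since the separator is the single character '('.
def get_type_group_py_alt (resolved_type : Option String) : Option String :=
  (resolved_type.filter (fun s => !(s = ""))).bind fun s =>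
    PySem.Dict.get? pvTypeToGroup
      (PySem.Str.strip
        (String.ofList (((PySem.Str.upper s).toList).takeWhile (fun c => c ≠ '('))))

-- ===== PRECONDITION & SPEC =====
def Spec_get_type_group_py (resolved_type : Option String) (out : Option String) : Prop := out = get_type_group_py_alt resolved_type
instance (resolved_type : Option String) (out : Option String) : Decidable (Spec_get_type_group_py resolved_type out) := by unfold Spec_get_type_group_py; infer_instance

-- ===== CLAIM (what is proved, stated in full; the proofs are below) =====
def Claim_equal_get_type_group_py : Prop := ∀ (resolved_type : Option String), Dom_get_type_group_py resolved_type → Spec_get_type_group_py resolved_type (get_type_group_py resolved_type)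

-- ===== LEMMAS AND PROOFS =====

-- splitOn's accumulator is a prefix (reversed) of the final result
theorem pv_go_acc (sep : List Char) (fuel : Nat) :
    ∀ (l cur : List Char) (acc : List (List Char)),
    ∃ t, PySem.Chars.splitOn.go sep fuel l cur acc = acc.reverse ++ t := by
  induction fuel with
  | zero => intro l cur acc; exact ⟨[(cur.reverse ++ l)], by simp [PySem.Chars.splitOn.go]⟩
  | succ n ih =>
      intro l cur acc
      match l with
      | [] => exact ⟨[cur.reverse], by simp [PySem.Chars.splitOn.go]⟩
      | c :: rest =>
          by_cases h : sep.isPrefixOf (c :: rest)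
          · obtain ⟨t, ht⟩ := ih (List.drop sep.length (c :: rest)) [] (cur.reverse :: acc)
            exact ⟨cur.reverse :: t, by simpa [PySem.Chars.splitOn.go, h] using ht⟩
          · obtain ⟨t, ht⟩ := ih rest (c :: cur) acc
            exact ⟨t, by simpa [PySem.Chars.splitOn.go, h] using ht⟩

-- head of split on the single character '(' is takeWhile (· ≠ '(')
theorem pv_go_head (fuel : Nat) :
    ∀ (l cur : List Char), l.length ≤ fuel →
    (PySem.Chars.splitOn.go ['('] fuel l cur []).headD []
      = cur.reverse ++ l.takeWhile (fun c => c ≠ '(') := by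
  induction fuel with
  | zero =>
      intro l cur h
      have : l = [] := List.eq_nil_of_length_eq_zero (Nat.le_zero.mp h)
      subst this; simp [PySem.Chars.splitOn.go]
  | succ n ih =>
      intro l cur h
      match l with
      | [] => simp [PySem.Chars.splitOn.go]
      | c :: rest =>
          by_cases hc : c = '('
          · have hp : List.isPrefixOf ['('] (c :: rest) = true := by simp [hc, List.isPrefixOf]
            obtain ⟨t, ht⟩ := pv_go_acc ['('] n rest [] [cur.reverse]
            simp only [PySem.Chars.splitOn.go, hp, if_true]
            simp [ht, List.takeWhile, hc]
          · have hp : List.isPrefixOf ['('] (c :: rest) = false := by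
              simp [List.isPrefixOf]; exact fun e => hc e.symm
            simp only [PySem.Chars.splitOn.go, hp, Bool.false_eq_true, if_false]
            rw [ih rest (c :: cur) (by simpa using Nat.succ_le_succ_iff.mp h)]
            simp [List.takeWhile, hc]

theorem pv_head_splitOn (l : List Char) :
    (PySem.Chars.splitOn l ['(']).headD [] = l.takeWhile (fun c => c ≠ '(') := by
  unfold PySem.Chars.splitOn
  simpa using pv_go_head (l.length + 1) l [] (Nat.le_succ _)

-- A's normalized string equals B's key, for every string
theorem pv_key_eq (u : String) :
    PySem.Str.strip (((PySem.Str.split? u "(").getD []).headD "")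
      = PySem.Str.strip (String.ofList (List.takeWhile (fun c => decide (c ≠ '(')) u.toList)) := by
  have h1 : PySem.Str.split? u "(" = some ((PySem.Chars.splitOn u.toList ['(']).map String.ofList) := by
    simp [PySem.Str.split?, PySem.Chars.split?]
  have h2 := pv_head_splitOn u.toList
  rw [h1, Option.getD_some]
  cases hsp : PySem.Chars.splitOn u.toList ['('] with
  | nil =>
      rw [hsp] at h2
      simp only [List.headD_nil] at h2
      rw [← h2]
      simp
  | cons a t =>
      rw [hsp] at h2
      simp only [List.headD_cons] at h2
      simp [h2]

-- looking up a block of keys that all map to g, followed by the rest of the flat list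
theorem pv_lookup_block (g : String) (L : List String) (rest : List (String × String))
    (n : String) :
    PySem.Dict.get? (PySem.Dict.mk (L.map (fun t => (t, g)) ++ rest)) n
      = if L.contains n then some g else PySem.Dict.get? (PySem.Dict.mk rest) n := by
  induction L with
  | nil => simp
  | cons x xs ih =>
      simp only [List.map_cons, List.cons_append, PySem.Dict.get?_mk_cons, ih,
        List.contains_cons]
      by_cases h : x = n
      · simp [h]
      · have h' : ¬ n = x := fun e => h e.symm
        simp [h, h']

-- the flat dict lookup agrees with A's group loop on every string
set_option maxRecDepth 8192 in
theorem pv_flat_eq_loop (n : String) :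
    PySem.Dict.get? pvTypeToGroup n = pvGroupLoop n pvTypeGroups := by
  have h : pvTypeToGroup = PySem.Dict.mk
      (pvNumericTypes.map (fun t => (t, "numeric")) ++
       (pvStringTypes.map (fun t => (t, "string")) ++
        (pvTemporalTypes.map (fun t => (t, "temporal")) ++
         (pvBooleanTypes.map (fun t => (t, "boolean")) ++
          (pvUuidTypes.map (fun t => (t, "uuid")) ++ []))))) := by decide
  rw [h, pv_lookup_block, pv_lookup_block, pv_lookup_block, pv_lookup_block,
    pv_lookup_block]
  simp [pvGroupLoop, pvTypeGroups, PySem.Dict.get?]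

-- ===== VERDICT (by name: the statement is the Claim_ definition above) =====
theorem get_type_group_py_spec : Claim_equal_get_type_group_py := by
  intro resolved_type _
  unfold Spec_get_type_group_py get_type_group_py get_type_group_py_alt
  match resolved_type with
  | none => rfl
  | some s =>
      by_cases h : s = ""
      · simp [h, Option.filter]
      · have hb : Option.filter (fun s => !decide (s = "")) (some s) = some s := by
          simp [Option.filter, h]
        show (if s = "" then none
            else pvGroupLoop
              (PySem.Str.strip (((PySem.Str.split? (PySem.Str.upper s) "(").getD []).headD ""))
              pvTypeGroups)
          = (Option.filter (fun s => !decide (s = "")) (some s)).bind fun s =>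
              PySem.Dict.get? pvTypeToGroup
                (PySem.Str.strip (String.ofList
                  (List.takeWhile (fun c => decide (c ≠ '(')) (PySem.Str.upper s).toList)))
        rw [if_neg h, hb, Option.bind_some, pv_flat_eq_loop, pv_key_eq]
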